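-- pv_equiv track=rewrite | github.com/gdanezis/sui-sampler | examples/user_call_profile.py | is_system_package
-- ===== SOURCE A (Python) =====
-- def is_system_package(package_id: str) -> bool:
--     """Check if a package ID is a system package (has at least 10 leading zeros)."""
--     if not package_id.startswith('0x'):
--         return False
--
--     # Remove the '0x' prefix and count leading zeros
--     hex_part = package_id[2:]
--     leading_zeros = 0
--     for char in hex_part:
--         if char == '0':
--             leading_zeros += 1
--         else:
--             break
--
--     return leading_zeros >= 10
-- ===== SOURCE B (Python) =====
-- def is_system_package(package_id: str) -> bool:
--     """Check if a package ID is a system package (has at least 10 leading zeros)."""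
--     return package_id.startswith('0x') and package_id[2:12] == '0000000000'
-- ===== Notes on version B (the rewrite author's own statement) =====
-- stated objective: simpler
-- what changed: Replaces the per-character counting loop with a single closed-form slice comparison: at least ten leading zeros iff the ten characters after the two-character hex prefix are all zero digits.
import Mathlib
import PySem

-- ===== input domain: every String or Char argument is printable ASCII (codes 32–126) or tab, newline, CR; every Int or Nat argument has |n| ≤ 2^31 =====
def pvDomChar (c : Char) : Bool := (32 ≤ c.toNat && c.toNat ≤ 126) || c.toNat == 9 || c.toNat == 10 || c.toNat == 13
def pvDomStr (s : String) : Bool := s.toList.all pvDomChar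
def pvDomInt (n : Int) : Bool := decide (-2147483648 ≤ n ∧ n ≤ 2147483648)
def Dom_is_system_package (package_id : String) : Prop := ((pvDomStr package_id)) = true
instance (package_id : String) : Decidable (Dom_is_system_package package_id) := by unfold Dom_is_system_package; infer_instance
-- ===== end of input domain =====

-- B replaces A's leading-zero counting loop with one closed-form slice comparison (same result, no loop).


-- ===== PORT A =====
-- A's loop: count leading '0' characters, stopping (break) at the first non-'0'
def pvLeadingZeros : List Char → Nat
  | [] => 0
  | c :: cs => if c = '0' then pvLeadingZeros cs + 1 else 0

def is_system_package (package_id : String) : Bool :=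
  if !PySem.Str.startswith package_id "0x" then false
  else
    let hex_part := PySem.Str.slice package_id (some 2) none
    let leading_zeros := pvLeadingZeros hex_part.toList
    decide (10 ≤ leading_zeros)

-- ===== PORT B =====
def is_system_package_alt (package_id : String) : Bool :=
  PySem.Str.startswith package_id "0x" &&
    decide ((PySem.Str.slice package_id (some 2) (some 12)).toList = "0000000000".toList)

-- ===== PRECONDITION & SPEC =====
def Spec_is_system_package (package_id : String) (out : Bool) : Prop := out = is_system_package_alt package_id
instance (package_id : String) (out : Bool) : Decidable (Spec_is_system_package package_id out) := by unfold Spec_is_system_package; infer_instance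

-- ===== CLAIM (what is proved, stated in full; the proofs are below) =====
def Claim_equal_is_system_package : Prop := ∀ (package_id : String), Dom_is_system_package package_id → Spec_is_system_package package_id (is_system_package package_id)

-- ===== LEMMAS AND PROOFS =====

-- n ≤ (number of leading '0's) iff the first n characters are all '0'
theorem pvLeadingZeros_iff_take (l : List Char) (n : Nat) :
    n ≤ pvLeadingZeros l ↔ l.take n = List.replicate n '0' := by
  induction l generalizing n with
  | nil =>
    cases n with
    | zero => simp [pvLeadingZeros]
    | succ m => simp [pvLeadingZeros]
  | cons c cs ih =>
    cases n with
    | zero => simp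
    | succ m =>
      by_cases hc : c = '0'
      · simp [pvLeadingZeros, hc, List.replicate_succ, ih]
      · simp [pvLeadingZeros, hc, List.replicate_succ]

-- ===== VERDICT (by name: the statement is the Claim_ definition above) =====
theorem is_system_package_spec : Claim_equal_is_system_package := by
  intro s _
  unfold Spec_is_system_package is_system_package is_system_package_alt
  have h2 : (PySem.Str.slice s (some 2) none).toList = s.toList.drop 2 := by
    simp only [pysem]
    rw [PySem.List.slice_from s.toList (by norm_num)]
    rfl
  have h12 : (PySem.Str.slice s (some 2) (some 12)).toList = (s.toList.drop 2).take 10 := by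
    simp only [pysem]
    rw [PySem.List.slice_toNat s.toList (by norm_num) (by norm_num)]
    rfl
  cases hsw : PySem.Str.startswith s "0x" with
  | false => simp
  | true =>
    simp only [Bool.not_true, Bool.true_and]
    rw [h2, h12, show "0000000000".toList = List.replicate 10 '0' from by decide]
    simp [pvLeadingZeros_iff_take]
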